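-- pv_equiv track=rewrite | github.com/abhinavpachauri/india-credit-lens | analysis/detect_format.py | check_series
-- ===== SOURCE A (Python) =====
-- EXPECTED_S1 = [
--     ("I",    "Bank Credit",                       False),
--     ("II",   "Food Credit",                       False),
--     ("III",  "Non-food Credit",                   False),
--     ("1",    "Agriculture",                       False),
--     ("2",    "Industry",                          False),
--     ("2.1",  "Micro and Small",                   False),
--     ("2.2",  "Medium",                            False),
--     ("2.3",  "Large",                             False),
--     ("3",    "Services",                          False),
--     ("3.1",  "Transport Operators",               False),
--     ("3.2",  "Computer Software",                 False),
--     ("3.3",  "Tourism, Hotels & Restaurants",     False),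
--     ("3.4",  "Shipping",                          False),
--     ("3.5",  "Aviation",                          False),
--     ("3.6",  "Professional Services",             False),
--     ("3.7",  "Trade",                             False),
--     ("3.8",  "Commercial Real Estate",            False),
--     ("3.9",  "NBFCs",                             False),
--     ("3.10", "Other Services",                    False),
--     ("4",    "Personal Loans",                    False),
--     ("4.1",  "Consumer Durables",                 False),
--     ("4.2",  "Housing",                           False),
--     ("4.3",  "Advances vs Fixed Deposits",        False),
--     ("4.4",  "Advances vs Shares/Bonds",          False),
--     ("4.5",  "Credit Card Outstanding",           False),
--     ("4.6",  "Education",                         False),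
--     ("4.7",  "Vehicle Loans",                     False),
--     ("4.8",  "Gold Loans",                        False),
--     ("4.9",  "Other Personal Loans",              False),
--     ("i",    "Agriculture (PSL)",                 True),
--     ("ii",   "Micro and Small Enterprises (PSL)", True),
--     ("iii",  "Medium Enterprises (PSL)",          True),
--     ("iv",   "Housing (PSL)",                     True),
--     ("v",    "Educational Loans (PSL)",           True),
--     ("vi",   "Renewable Energy (PSL)",            True),
--     ("vii",  "Social Infrastructure (PSL)",       True),
--     ("viii", "Export Credit (PSL)",               True),
--     ("ix",   "Others (PSL)",                      True),
--     ("x",    "Weaker Sections (PSL)",             True),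
-- ]
--
-- KNOWN_S2_LEVEL2_CODES = {
--     "2.1", "2.2", "2.3", "2.4", "2.5", "2.6", "2.7", "2.8",
--     "2.9", "2.10", "2.11", "2.12", "2.13", "2.14", "2.15",
--     "2.16", "2.17", "2.18", "2.19",
-- }
--
-- def check_series(s1_found: dict, s2_found: dict) -> dict:
--     """Compare found codes against expected codes."""
--     expected_s1_codes = {e[0]: e[1] for e in EXPECTED_S1}
--
--     missing = [
--         {"code": code, "expected_label": label}
--         for code, label in expected_s1_codes.items()
--         if code not in s1_found
--     ]
--     new_s2 = [
--         {"code": code, "name": name}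
--         for code, name in s2_found.items()
--         if code not in KNOWN_S2_LEVEL2_CODES
--         # Only flag level-2 codes (e.g. "2.20"), not deeper sub-items
--         and len(code.split(".")) == 2
--     ]
--     # Name changes on parent codes are cosmetic — lookup is by code, not label.
--     # Only flag renames on leaf/sub-codes (level ≥ 2, i.e. code contains ".").
--     name_changes = [
--         {"code": code, "expected": expected_s1_codes[code], "found": s1_found[code]}
--         for code in expected_s1_codes
--         if code in s1_found
--         and s1_found[code] != expected_s1_codes[code]
--         and "." in str(code)   # sub-codes only; parent renames are intentionally ignored
--     ]
--
--     return {"missing": missing, "new_s2": new_s2, "name_changes": name_changes}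
-- ===== SOURCE B (Python) =====
-- EXPECTED_S1 = [
--     ("I",    "Bank Credit",                       False),
--     ("II",   "Food Credit",                       False),
--     ("III",  "Non-food Credit",                   False),
--     ("1",    "Agriculture",                       False),
--     ("2",    "Industry",                          False),
--     ("2.1",  "Micro and Small",                   False),
--     ("2.2",  "Medium",                            False),
--     ("2.3",  "Large",                             False),
--     ("3",    "Services",                          False),
--     ("3.1",  "Transport Operators",               False),
--     ("3.2",  "Computer Software",                 False),
--     ("3.3",  "Tourism, Hotels & Restaurants",     False),
--     ("3.4",  "Shipping",                          False),
--     ("3.5",  "Aviation",                          False),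
--     ("3.6",  "Professional Services",             False),
--     ("3.7",  "Trade",                             False),
--     ("3.8",  "Commercial Real Estate",            False),
--     ("3.9",  "NBFCs",                             False),
--     ("3.10", "Other Services",                    False),
--     ("4",    "Personal Loans",                    False),
--     ("4.1",  "Consumer Durables",                 False),
--     ("4.2",  "Housing",                           False),
--     ("4.3",  "Advances vs Fixed Deposits",        False),
--     ("4.4",  "Advances vs Shares/Bonds",          False),
--     ("4.5",  "Credit Card Outstanding",           False),
--     ("4.6",  "Education",                         False),
--     ("4.7",  "Vehicle Loans",                     False),
--     ("4.8",  "Gold Loans",                        False),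
--     ("4.9",  "Other Personal Loans",              False),
--     ("i",    "Agriculture (PSL)",                 True),
--     ("ii",   "Micro and Small Enterprises (PSL)", True),
--     ("iii",  "Medium Enterprises (PSL)",          True),
--     ("iv",   "Housing (PSL)",                     True),
--     ("v",    "Educational Loans (PSL)",           True),
--     ("vi",   "Renewable Energy (PSL)",            True),
--     ("vii",  "Social Infrastructure (PSL)",       True),
--     ("viii", "Export Credit (PSL)",               True),
--     ("ix",   "Others (PSL)",                      True),
--     ("x",    "Weaker Sections (PSL)",             True),
-- ]
--
-- KNOWN_S2_LEVEL2_CODES = {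
--     "2.1", "2.2", "2.3", "2.4", "2.5", "2.6", "2.7", "2.8",
--     "2.9", "2.10", "2.11", "2.12", "2.13", "2.14", "2.15",
--     "2.16", "2.17", "2.18", "2.19",
-- }
--
--
-- def check_series(s1_found: dict, s2_found: dict) -> dict:
--     """Sort-merge join: both code lists are sorted and merged with one linear scan
--     (no hash membership tests); carried original indices restore EXPECTED_S1 order."""
--     exp = sorted(((code, label, i) for i, (code, label, _) in enumerate(EXPECTED_S1)),
--                  key=lambda t: t[0])
--     fnd = sorted(s1_found.items(), key=lambda kv: kv[0])
--     missing_i = []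
--     changes_i = []
--     j = 0
--     for code, label, i in exp:
--         while j < len(fnd) and fnd[j][0] < code:
--             j += 1
--         if j < len(fnd) and fnd[j][0] == code:
--             found = fnd[j][1]
--             if found != label and "." in code:
--                 changes_i.append((i, {"code": code, "expected": label, "found": found}))
--         else:
--             missing_i.append((i, {"code": code, "expected_label": label}))
--     missing = [d for _, d in sorted(missing_i, key=lambda t: t[0])]
--     name_changes = [d for _, d in sorted(changes_i, key=lambda t: t[0])]
--     new_s2 = [
--         {"code": code, "name": name}
--         for code, name in s2_found.items()
--         if code not in KNOWN_S2_LEVEL2_CODES and len(code.split(".")) == 2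
--     ]
--     return {"missing": missing, "new_s2": new_s2, "name_changes": name_changes}
-- ===== Notes on version B (the rewrite author's own statement) =====
-- stated objective: alternative
-- what changed: B replaces A's dict/hash membership comprehensions by a sort-merge join: both code lists are sorted and merged in one linear scan (missing = unmatched expected codes, renames = matched-with-different-label sub-codes), with carried enumerate indices re-sorted to restore EXPECTED_S1 order.
import Mathlib
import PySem

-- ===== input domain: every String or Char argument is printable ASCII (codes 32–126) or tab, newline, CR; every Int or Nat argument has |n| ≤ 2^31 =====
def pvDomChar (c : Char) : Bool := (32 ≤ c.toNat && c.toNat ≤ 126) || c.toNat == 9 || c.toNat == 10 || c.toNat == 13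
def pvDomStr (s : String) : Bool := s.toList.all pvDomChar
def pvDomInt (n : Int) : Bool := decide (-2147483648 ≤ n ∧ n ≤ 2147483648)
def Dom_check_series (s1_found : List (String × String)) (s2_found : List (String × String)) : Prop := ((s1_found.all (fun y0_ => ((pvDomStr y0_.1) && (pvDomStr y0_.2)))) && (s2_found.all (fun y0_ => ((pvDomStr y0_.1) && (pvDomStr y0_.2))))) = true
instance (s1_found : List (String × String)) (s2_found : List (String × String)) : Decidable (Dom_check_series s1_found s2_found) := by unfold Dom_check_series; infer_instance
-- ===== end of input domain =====

-- B replaces A's dict/hash membership comprehensions by a sort-merge join of the two code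
-- lists (one linear merge scan over both sorted lists, carried indices restore original
-- order); same return value, objective: alternative algorithm.

-- ===== PORT A =====
-- module-level constants shared by both ports
def pvEXPECTED_S1 : List (String × String × Bool) := [
  ("I",    "Bank Credit",                       false),
  ("II",   "Food Credit",                       false),
  ("III",  "Non-food Credit",                   false),
  ("1",    "Agriculture",                       false),
  ("2",    "Industry",                          false),
  ("2.1",  "Micro and Small",                   false),
  ("2.2",  "Medium",                            false),
  ("2.3",  "Large",                             false),
  ("3",    "Services",                          false),
  ("3.1",  "Transport Operators",               false),
  ("3.2",  "Computer Software",                 false),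
  ("3.3",  "Tourism, Hotels & Restaurants",     false),
  ("3.4",  "Shipping",                          false),
  ("3.5",  "Aviation",                          false),
  ("3.6",  "Professional Services",             false),
  ("3.7",  "Trade",                             false),
  ("3.8",  "Commercial Real Estate",            false),
  ("3.9",  "NBFCs",                             false),
  ("3.10", "Other Services",                    false),
  ("4",    "Personal Loans",                    false),
  ("4.1",  "Consumer Durables",                 false),
  ("4.2",  "Housing",                           false),
  ("4.3",  "Advances vs Fixed Deposits",        false),
  ("4.4",  "Advances vs Shares/Bonds",          false),
  ("4.5",  "Credit Card Outstanding",           false),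
  ("4.6",  "Education",                         false),
  ("4.7",  "Vehicle Loans",                     false),
  ("4.8",  "Gold Loans",                        false),
  ("4.9",  "Other Personal Loans",              false),
  ("i",    "Agriculture (PSL)",                 true),
  ("ii",   "Micro and Small Enterprises (PSL)", true),
  ("iii",  "Medium Enterprises (PSL)",          true),
  ("iv",   "Housing (PSL)",                     true),
  ("v",    "Educational Loans (PSL)",           true),
  ("vi",   "Renewable Energy (PSL)",            true),
  ("vii",  "Social Infrastructure (PSL)",       true),
  ("viii", "Export Credit (PSL)",               true),
  ("ix",   "Others (PSL)",                      true),
  ("x",    "Weaker Sections (PSL)",             true)]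

def pvKNOWN_S2 : PySem.Set String := PySem.Set.ofList [
  "2.1", "2.2", "2.3", "2.4", "2.5", "2.6", "2.7", "2.8",
  "2.9", "2.10", "2.11", "2.12", "2.13", "2.14", "2.15",
  "2.16", "2.17", "2.18", "2.19"]

-- the dict comprehension {e[0]: e[1] for e in EXPECTED_S1}, hoisted as an A-side helper (it reads only the constant)
def pvExpectedDict : PySem.Dict String String :=
  pvEXPECTED_S1.foldl (fun d e => d.insert e.1 e.2.1) PySem.Dict.empty

-- dict params are represented as assoc lists; PySem.Dict.ofList rebuilds the dict (insertion order, overwrite)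
-- s.split(".") has a nonempty separator, so PySem.Chars.splitOn is exact
def check_series (s1_found : List (String × String)) (s2_found : List (String × String)) : List (String × List (List (String × String))) :=
  let s1d : PySem.Dict String String := PySem.Dict.ofList s1_found
  let s2d : PySem.Dict String String := PySem.Dict.ofList s2_found
  let expected_s1_codes : PySem.Dict String String := pvExpectedDict
  let missing : List (List (String × String)) :=
    expected_s1_codes.items.filterMap (fun p =>
      if s1d.contains p.1 = false then some [("code", p.1), ("expected_label", p.2)] else none)
  let new_s2 : List (List (String × String)) :=
    s2d.items.filterMap (fun p =>
      if pvKNOWN_S2.contains p.1 = false ∧ (PySem.Chars.splitOn p.1.toList ['.']).length = 2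
      then some [("code", p.1), ("name", p.2)] else none)
  -- s1_found[code] / expected_s1_codes[code] are guarded by 'code in …', so getD "" is exact (KeyError unreachable)
  let name_changes : List (List (String × String)) :=
    expected_s1_codes.keys.filterMap (fun code =>
      if s1d.contains code = true ∧ s1d.getD code "" ≠ expected_s1_codes.getD code "" ∧ PySem.Str.isIn "." code = true
      then some [("code", code), ("expected", expected_s1_codes.getD code ""), ("found", s1d.getD code "")] else none)
  [("missing", missing), ("new_s2", new_s2), ("name_changes", name_changes)]

-- ===== PORT B =====
-- Source B's inner while loop: 'while j < len(fnd) and fnd[j][0] < code: j += 1'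
def pvAdvance (fnd : List (String × String)) (code : String) (j : Nat) : Nat :=
  if h : j < fnd.length then
    if fnd[j].1 < code then pvAdvance fnd code (j + 1) else j
  else j
termination_by fnd.length - j

-- Source B's merge loop over the sorted expected list, carrying the cursor j into the sorted found list
def pvMergeIdx (fnd : List (String × String)) : List (String × String × Int) → Nat →
    List (Int × List (String × String)) × List (Int × List (String × String))
  | [], _ => ([], [])
  | (code, label, i) :: rest, j =>
    let j' := pvAdvance fnd code j
    let r := pvMergeIdx fnd rest j'
    if h : j' < fnd.length then
      if fnd[j'].1 = code then
        if fnd[j'].2 ≠ label ∧ PySem.Str.isIn "." code = true then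
          (r.1, (i, [("code", code), ("expected", label), ("found", fnd[j'].2)]) :: r.2)
        else r
      else ((i, [("code", code), ("expected_label", label)]) :: r.1, r.2)
    else ((i, [("code", code), ("expected_label", label)]) :: r.1, r.2)

def check_series_alt (s1_found : List (String × String)) (s2_found : List (String × String)) : List (String × List (List (String × String))) :=
  let exp := PySem.List.sorted ((PySem.List.enumerate pvEXPECTED_S1).map (fun p => (p.2.1, p.2.2.1, p.1))) (fun t => t.1)
  let fnd := PySem.List.sorted (PySem.Dict.ofList s1_found).items (fun kv => kv.1)
  let r := pvMergeIdx fnd exp 0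
  let missing := (PySem.List.sorted r.1 (fun t => t.1)).map (fun t => t.2)
  let name_changes := (PySem.List.sorted r.2 (fun t => t.1)).map (fun t => t.2)
  let new_s2 : List (List (String × String)) :=
    (PySem.Dict.ofList s2_found).items.filterMap (fun p =>
      if pvKNOWN_S2.contains p.1 = false ∧ (PySem.Chars.splitOn p.1.toList ['.']).length = 2
      then some [("code", p.1), ("name", p.2)] else none)
  [("missing", missing), ("new_s2", new_s2), ("name_changes", name_changes)]

-- ===== PRECONDITION & SPEC =====
def Spec_check_series (s1_found : List (String × String)) (s2_found : List (String × String)) (out : List (String × List (List (String × String)))) : Prop := out = check_series_alt s1_found s2_found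
instance (s1_found : List (String × String)) (s2_found : List (String × String)) (out : List (String × List (List (String × String)))) : Decidable (Spec_check_series s1_found s2_found out) := by unfold Spec_check_series; infer_instance

-- ===== CLAIM (what is proved, stated in full; the proofs are below) =====
def Claim_equal_check_series : Prop := ∀ (s1_found : List (String × String)) (s2_found : List (String × String)), Dom_check_series s1_found s2_found → Spec_check_series s1_found s2_found (check_series s1_found s2_found)

-- ===== LEMMAS AND PROOFS =====

-- list-consuming model of the cursor-based merge (proof layer)
def pvSkip : List (String × String) → String → List (String × String)
  | [], _ => []
  | p :: rest, code => if p.1 < code then pvSkip rest code else p :: rest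

def pvMerge : List (String × String × Int) → List (String × String) →
    List (Int × List (String × String)) × List (Int × List (String × String))
  | [], _ => ([], [])
  | (code, label, i) :: rest, fnd =>
    let fnd' := pvSkip fnd code
    let r := pvMerge rest fnd'
    match fnd' with
    | (c, v) :: _ =>
      if c = code then
        if v ≠ label ∧ PySem.Str.isIn "." code = true then
          (r.1, (i, [("code", code), ("expected", label), ("found", v)]) :: r.2)
        else r
      else ((i, [("code", code), ("expected_label", label)]) :: r.1, r.2)
    | [] => ((i, [("code", code), ("expected_label", label)]) :: r.1, r.2)

-- the cursor j IS the consumed prefix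
theorem pvAdvance_drop (fnd : List (String × String)) (code : String) (j : Nat) :
    fnd.drop (pvAdvance fnd code j) = pvSkip (fnd.drop j) code := by
  have H : ∀ n j, fnd.length - j ≤ n → fnd.drop (pvAdvance fnd code j) = pvSkip (fnd.drop j) code := by
    intro n
    induction n with
    | zero =>
      intro j hj
      have hle : fnd.length ≤ j := by omega
      rw [pvAdvance, dif_neg (by omega), List.drop_eq_nil_of_le hle]
      rfl
    | succ n ihn =>
      intro j hj
      by_cases h : j < fnd.length
      · rw [pvAdvance, dif_pos h]
        by_cases hlt : fnd[j].1 < code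
        · rw [if_pos hlt, ihn (j + 1) (by omega), List.drop_eq_getElem_cons h]
          simp [pvSkip, hlt]
        · rw [if_neg hlt, List.drop_eq_getElem_cons h]
          simp [pvSkip, hlt]
      · rw [pvAdvance, dif_neg h, List.drop_eq_nil_of_le (Nat.le_of_not_lt h)]
        rfl
  exact H (fnd.length - j) j le_rfl

theorem pvMergeIdx_eq (fnd : List (String × String)) (exp : List (String × String × Int)) (j : Nat) :
    pvMergeIdx fnd exp j = pvMerge exp (fnd.drop j) := by
  induction exp generalizing j with
  | nil => rfl
  | cons e rest ih =>
    obtain ⟨code, label, i⟩ := e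
    have hadv := pvAdvance_drop fnd code j
    simp only [pvMergeIdx, pvMerge, ih, ← hadv]
    by_cases h : pvAdvance fnd code j < fnd.length
    · rw [List.drop_eq_getElem_cons h]
      simp only [dif_pos h]
      rfl
    · rw [List.drop_eq_nil_of_le (Nat.le_of_not_lt h)]
      simp only [dif_neg h]

-- first-match association lookup, the semantic content of both the dict lookup and the merge
def pvLk (fnd : List (String × String)) (c : String) : Option String :=
  (fnd.find? (fun p => p.1 == c)).map (fun p => p.2)

-- the enumerated expected list before sorting
def pvEnumExp : List (String × String × Int) :=
  (PySem.List.enumerate pvEXPECTED_S1).map (fun p => (p.2.1, p.2.2.1, p.1))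

def pvGMiss (lk : String → Option String) (t : String × String × Int) : Option (Int × List (String × String)) :=
  if lk t.1 = none then some (t.2.2, [("code", t.1), ("expected_label", t.2.1)]) else none

def pvGChg (lk : String → Option String) (t : String × String × Int) : Option (Int × List (String × String)) :=
  match lk t.1 with
  | some v => if v ≠ t.2.1 ∧ PySem.Str.isIn "." t.1 = true then
      some (t.2.2, [("code", t.1), ("expected", t.2.1), ("found", v)]) else none
  | none => none

theorem pvSkip_sublist (fnd : List (String × String)) (code : String) : (pvSkip fnd code).Sublist fnd := by
  induction fnd with
  | nil => simp [pvSkip]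
  | cons p rest ih =>
    simp only [pvSkip]
    split_ifs with h
    · exact ih.cons p
    · exact List.Sublist.refl _

theorem pvLk_skip (fnd : List (String × String)) (code c : String) (h : code ≤ c) :
    pvLk (pvSkip fnd code) c = pvLk fnd c := by
  induction fnd with
  | nil => rfl
  | cons p rest ih =>
    simp only [pvSkip]
    split_ifs with hlt
    · have hne : p.1 ≠ c := ne_of_lt (lt_of_lt_of_le hlt h)
      rw [ih]
      simp [pvLk, hne]
    · rfl

theorem pvLk_none_of_forall (fnd : List (String × String)) (c : String)
    (h : ∀ p ∈ fnd, p.1 ≠ c) : pvLk fnd c = none := by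
  simp only [pvLk, Option.map_eq_none_iff, List.find?_eq_none]
  intro p hp
  simp [h p hp]

theorem pvSkip_head_not_lt (fnd : List (String × String)) (code : String) (p : String × String)
    (rest2 : List (String × String)) (h : pvSkip fnd code = p :: rest2) : ¬ p.1 < code := by
  induction fnd with
  | nil => simp [pvSkip] at h
  | cons q rest ih =>
    simp only [pvSkip] at h
    split_ifs at h with hlt
    · exact ih h
    · cases h; exact hlt

theorem pvMerge_eq (exp : List (String × String × Int)) (fnd : List (String × String))
    (hexp : exp.Pairwise (fun a b => a.1 < b.1)) (hfnd : fnd.Pairwise (fun a b => a.1 < b.1)) :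
    pvMerge exp fnd = (exp.filterMap (pvGMiss (pvLk fnd)), exp.filterMap (pvGChg (pvLk fnd))) := by
  induction exp generalizing fnd with
  | nil => simp [pvMerge]
  | cons e rest ih =>
    obtain ⟨code, label, i⟩ := e
    obtain ⟨hhead, htail⟩ := List.pairwise_cons.mp hexp
    have hfnd' : (pvSkip fnd code).Pairwise (fun a b => a.1 < b.1) :=
      hfnd.sublist (pvSkip_sublist fnd code)
    have hIH := ih (pvSkip fnd code) htail hfnd'
    have hmissr : rest.filterMap (pvGMiss (pvLk (pvSkip fnd code))) = rest.filterMap (pvGMiss (pvLk fnd)) :=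
      List.filterMap_congr (fun t ht => by
        simp [pvGMiss, pvLk_skip fnd code t.1 (le_of_lt (hhead t ht))])
    have hchgr : rest.filterMap (pvGChg (pvLk (pvSkip fnd code))) = rest.filterMap (pvGChg (pvLk fnd)) :=
      List.filterMap_congr (fun t ht => by
        simp [pvGChg, pvLk_skip fnd code t.1 (le_of_lt (hhead t ht))])
    cases hs : pvSkip fnd code with
    | nil =>
      have hnone : pvLk fnd code = none := by
        rw [← pvLk_skip fnd code code le_rfl, hs]; rfl
      have hm : pvGMiss (pvLk fnd) (code, label, i) = some (i, [("code", code), ("expected_label", label)]) := by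
        simp [pvGMiss, hnone]
      have hc : pvGChg (pvLk fnd) (code, label, i) = none := by
        simp [pvGChg, hnone]
      rw [hs] at hIH hmissr hchgr
      simp only [pvMerge, hs, hIH, List.filterMap_cons, hm, hc, hmissr, hchgr]
    | cons p rest2 =>
      obtain ⟨c, v⟩ := p
      have hcl : ¬ c < code := pvSkip_head_not_lt fnd code (c, v) rest2 hs
      rw [hs] at hIH hmissr hchgr
      by_cases hceq : c = code
      · subst hceq
        have hsome : pvLk fnd c = some v := by
          rw [← pvLk_skip fnd c c le_rfl, hs]
          simp [pvLk]
        have hm : pvGMiss (pvLk fnd) (c, label, i) = none := by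
          simp [pvGMiss, hsome]
        by_cases hcond : v ≠ label ∧ PySem.Str.isIn "." c = true
        · have hch : pvGChg (pvLk fnd) (c, label, i) = some (i, [("code", c), ("expected", label), ("found", v)]) := by
            simp only [pvGChg, hsome]
            rw [if_pos hcond]
          simp only [pvMerge, hs, hIH, List.filterMap_cons, hm, hch, hmissr, hchgr, if_pos hcond]
          simp
        · have hch : pvGChg (pvLk fnd) (c, label, i) = none := by
            simp only [pvGChg, hsome]
            rw [if_neg hcond]
          simp only [pvMerge, hs, hIH, List.filterMap_cons, hm, hch, hmissr, hchgr, if_neg hcond]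
          simp
      · have hgt : code < c := lt_of_le_of_ne (not_lt.mp hcl) (Ne.symm hceq)
        have hnone : pvLk fnd code = none := by
          rw [← pvLk_skip fnd code code le_rfl, hs]
          apply pvLk_none_of_forall
          intro q hq
          rcases List.mem_cons.mp hq with h1 | h1
          · subst h1; exact Ne.symm (ne_of_lt hgt)
          · rw [hs] at hfnd'
            have := (List.pairwise_cons.mp hfnd').1 q h1
            exact Ne.symm (ne_of_lt (lt_trans hgt this))
        have hm : pvGMiss (pvLk fnd) (code, label, i) = some (i, [("code", code), ("expected_label", label)]) := by
          simp [pvGMiss, hnone]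
        have hc : pvGChg (pvLk fnd) (code, label, i) = none := by
          simp [pvGChg, hnone]
        simp only [pvMerge, hs, hIH, List.filterMap_cons, hm, hc, hmissr, hchgr, if_neg hceq]

-- a sort whose keys are distinct is strictly increasing
theorem pvSorted_pairwise_lt {α κ : Type} [LinearOrder κ] (xs : List α) (key : α → κ)
    (h : (xs.map key).Nodup) : (PySem.List.sorted xs key).Pairwise (fun a b => key a < key b) := by
  have hle := PySem.List.sorted_pairwise xs key
  have hperm : ((PySem.List.sorted xs key).map key).Perm (xs.map key) :=
    (PySem.List.sorted_perm xs key false).map key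
  have hnd : ((PySem.List.sorted xs key).map key).Nodup := hperm.nodup_iff.mpr h
  have hne : (PySem.List.sorted xs key).Pairwise (fun a b => key a ≠ key b) :=
    (List.pairwise_map).mp hnd
  exact (hle.and hne).imp (fun h => lt_of_le_of_ne h.1 h.2)

-- lookup in the sorted items list IS the dict lookup
theorem pvLk_sorted_items (s1_found : List (String × String)) (c : String) :
    pvLk (PySem.List.sorted (PySem.Dict.ofList s1_found).items (fun kv => kv.1)) c
      = (PySem.Dict.ofList s1_found).get? c := by
  set d := PySem.Dict.ofList s1_found with hd
  set fnd := PySem.List.sorted d.items (fun kv => kv.1) with hf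
  have hmem : ∀ p : String × String, p ∈ fnd ↔ p ∈ d.items := fun p =>
    (PySem.List.sorted_perm d.items (fun kv => kv.1) false).mem_iff
  cases h : (fnd.find? (fun p => p.1 == c)) with
  | none =>
    have hnone : ∀ p ∈ fnd, p.1 ≠ c := by
      intro p hp
      have := List.find?_eq_none.mp h p hp
      simpa using this
    cases hg : d.get? c with
    | none => simp [pvLk, h]
    | some v =>
      have : (c, v) ∈ d.items := PySem.Dict.mem_items_of_get?_eq_some d hg
      exact absurd rfl (hnone (c, v) ((hmem (c, v)).mpr this))
  | some p =>
    have hpc : p.1 = c := by simpa using List.find?_some h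
    have hpm : p ∈ d.items := (hmem p).mp (List.mem_of_find?_eq_some h)
    have : d.get? p.1 = some p.2 := PySem.Dict.get?_of_mem_items d (by simpa using hpm)
      (PySem.Dict.nodup_keys_ofList s1_found)
    rw [hpc] at this
    simp [pvLk, h, this]

-- enumerate's index is invisible to an index-ignoring filterMap
theorem pvFilterMap_enumerate {α β : Type} (xs : List α) (h : α → Option β) (s : Int) :
    (PySem.List.enumerate xs s).filterMap (fun p => h p.2) = xs.filterMap h := by
  induction xs generalizing s with
  | nil => rfl
  | cons x rest ih => simp [PySem.List.enumerate, List.filterMap_cons, ih]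

-- keys-iteration + dict lookup = items-iteration, when the keys are unique
theorem pvFilterMap_keys_eq {a : Type} (d : PySem.Dict String String) (hn : d.keys.Nodup)
    (g : String -> String -> Option a) :
    d.keys.filterMap (fun k => g k (d.getD k "")) = d.items.filterMap (fun p => g p.1 p.2) := by
  have hk : d.keys = d.items.map Prod.fst := rfl
  rw [hk, List.filterMap_map]
  refine List.filterMap_congr (fun p hp => ?_)
  obtain ⟨k, v⟩ := p
  have h := PySem.Dict.get?_of_mem_items d hp hn
  simp [Function.comp, PySem.Dict.getD_eq_get?_getD, h]

set_option maxRecDepth 100000 in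
theorem pvExpectedDict_items : pvExpectedDict.items = pvEXPECTED_S1.map (fun e => (e.1, e.2.1)) := by
  decide

set_option maxRecDepth 100000 in
theorem pvExpectedDict_keys_nodup : pvExpectedDict.keys.Nodup := by decide

set_option maxRecDepth 100000 in
theorem pvEnumExp_codes_nodup : (pvEnumExp.map (fun t => t.1)).Nodup := by decide

set_option maxRecDepth 100000 in
theorem pvEnumExp_idx_pairwise : pvEnumExp.Pairwise (fun a b => a.2.2 < b.2.2) := by decide

-- A's missing pass, rephrased over the constant list with dict lookups
theorem pvA_miss (s1_found : List (String × String)) :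
    pvExpectedDict.items.filterMap (fun p => if (PySem.Dict.ofList s1_found).contains p.1 = false then some [("code", p.1), ("expected_label", p.2)] else none)
    = pvEXPECTED_S1.filterMap (fun e => if (PySem.Dict.ofList s1_found).get? e.1 = none then some [("code", e.1), ("expected_label", e.2.1)] else none) := by
  rw [pvExpectedDict_items, List.filterMap_map]
  refine List.filterMap_congr (fun e he => ?_)
  cases hq : (PySem.Dict.ofList s1_found).get? e.1 <;>
    simp [Function.comp, PySem.Dict.contains_eq_isSome_get?, hq]

theorem pvA_chg (s1_found : List (String × String)) :
    pvExpectedDict.keys.filterMap (fun code =>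
      if (PySem.Dict.ofList s1_found).contains code = true ∧ (PySem.Dict.ofList s1_found).getD code "" ≠ pvExpectedDict.getD code "" ∧ PySem.Str.isIn "." code = true
      then some [("code", code), ("expected", pvExpectedDict.getD code ""), ("found", (PySem.Dict.ofList s1_found).getD code "")] else none)
    = pvEXPECTED_S1.filterMap (fun e => match (PySem.Dict.ofList s1_found).get? e.1 with
        | some v => if v ≠ e.2.1 ∧ PySem.Str.isIn "." e.1 = true then some [("code", e.1), ("expected", e.2.1), ("found", v)] else none
        | none => none) := by
  rw [pvFilterMap_keys_eq pvExpectedDict pvExpectedDict_keys_nodup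
      (fun k v => if (PySem.Dict.ofList s1_found).contains k = true ∧ (PySem.Dict.ofList s1_found).getD k "" ≠ v ∧ PySem.Str.isIn "." k = true
        then some [("code", k), ("expected", v), ("found", (PySem.Dict.ofList s1_found).getD k "")] else none)]
  rw [pvExpectedDict_items, List.filterMap_map]
  refine List.filterMap_congr (fun e he => ?_)
  cases hq : (PySem.Dict.ofList s1_found).get? e.1 with
  | none => simp [Function.comp, PySem.Dict.contains_eq_isSome_get?, hq]
  | some v => simp [Function.comp, PySem.Dict.contains_eq_isSome_get?, PySem.Dict.getD_eq_get?_getD, hq]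

theorem pvGMiss_fst (lk : String → Option String) (a : String × String × Int)
    (b : Int × List (String × String)) (h : pvGMiss lk a = some b) : b.1 = a.2.2 := by
  unfold pvGMiss at h
  by_cases hc : lk a.1 = none
  · rw [if_pos hc] at h; injection h with h; subst h; rfl
  · rw [if_neg hc] at h; exact absurd h (by simp)

theorem pvGChg_fst (lk : String → Option String) (a : String × String × Int)
    (b : Int × List (String × String)) (h : pvGChg lk a = some b) : b.1 = a.2.2 := by
  unfold pvGChg at h
  rcases hv : lk a.1 with _ | v <;> simp only [hv] at h
  · exact absurd h (by simp)
  · by_cases hc : v ≠ a.2.1 ∧ PySem.Str.isIn "." a.1 = true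
    · rw [if_pos hc] at h; injection h with h; subst h; rfl
    · rw [if_neg hc] at h; exact absurd h (by simp)

-- B's missing output = the same filterMap over the constant list, for any lookup function
theorem pvB_miss (lk : String → Option String) :
    (PySem.List.sorted ((PySem.List.sorted pvEnumExp (fun t => t.1)).filterMap (pvGMiss lk)) (fun t => t.1)).map (fun t => t.2)
    = pvEXPECTED_S1.filterMap (fun e => if lk e.1 = none then some [("code", e.1), ("expected_label", e.2.1)] else none) := by
  have hperm : (pvEnumExp.filterMap (pvGMiss lk)).Perm ((PySem.List.sorted pvEnumExp (fun t => t.1)).filterMap (pvGMiss lk)) :=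
    ((PySem.List.sorted_perm pvEnumExp (fun t => t.1) false).symm).filterMap _
  have hpw : (pvEnumExp.filterMap (pvGMiss lk)).Pairwise (fun a b => a.1 < b.1) := by
    refine List.Pairwise.filterMap _ (fun a a' hlt b hb b' hb' => ?_) pvEnumExp_idx_pairwise
    rw [pvGMiss_fst lk a b hb, pvGMiss_fst lk a' b' hb']
    exact hlt
  rw [PySem.List.sorted_eq_of_perm_of_pairwise_lt _ _ _ hperm hpw]
  unfold pvEnumExp
  rw [List.filterMap_map, List.map_filterMap]
  have h1 := List.filterMap_congr (l := PySem.List.enumerate pvEXPECTED_S1)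
    (f := fun p => ((pvGMiss lk ∘ fun p => (p.2.1, p.2.2.1, p.1)) p).map (fun t => t.2))
    (g := fun p => (fun e => if lk e.1 = none then some [("code", e.1), ("expected_label", e.2.1)] else none) p.2)
    (fun p _ => by by_cases h : lk p.2.1 = none <;> simp [pvGMiss, Function.comp, h])
  rw [h1]
  exact pvFilterMap_enumerate pvEXPECTED_S1
    (fun e => if lk e.1 = none then some [("code", e.1), ("expected_label", e.2.1)] else none) 0

theorem pvB_chg (lk : String → Option String) :
    (PySem.List.sorted ((PySem.List.sorted pvEnumExp (fun t => t.1)).filterMap (pvGChg lk)) (fun t => t.1)).map (fun t => t.2)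
    = pvEXPECTED_S1.filterMap (fun e => match lk e.1 with
        | some v => if v ≠ e.2.1 ∧ PySem.Str.isIn "." e.1 = true then some [("code", e.1), ("expected", e.2.1), ("found", v)] else none
        | none => none) := by
  have hperm : (pvEnumExp.filterMap (pvGChg lk)).Perm ((PySem.List.sorted pvEnumExp (fun t => t.1)).filterMap (pvGChg lk)) :=
    ((PySem.List.sorted_perm pvEnumExp (fun t => t.1) false).symm).filterMap _
  have hpw : (pvEnumExp.filterMap (pvGChg lk)).Pairwise (fun a b => a.1 < b.1) := by
    refine List.Pairwise.filterMap _ (fun a a' hlt b hb b' hb' => ?_) pvEnumExp_idx_pairwise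
    rw [pvGChg_fst lk a b hb, pvGChg_fst lk a' b' hb']
    exact hlt
  rw [PySem.List.sorted_eq_of_perm_of_pairwise_lt _ _ _ hperm hpw]
  unfold pvEnumExp
  rw [List.filterMap_map, List.map_filterMap]
  have h1 := List.filterMap_congr (l := PySem.List.enumerate pvEXPECTED_S1)
    (f := fun p => ((pvGChg lk ∘ fun p => (p.2.1, p.2.2.1, p.1)) p).map (fun t => t.2))
    (g := fun p => (fun e => match lk e.1 with
        | some v => if v ≠ e.2.1 ∧ PySem.Str.isIn "." e.1 = true then some [("code", e.1), ("expected", e.2.1), ("found", v)] else none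
        | none => none) p.2)
    (fun p _ => by
      rcases h : lk p.2.1 with _ | v
      · simp [pvGChg, Function.comp, h]
      · by_cases hc : v ≠ p.2.2.1 ∧ PySem.Str.isIn "." p.2.1 = true <;>
          simp [pvGChg, Function.comp, h, hc])
  rw [h1]
  exact pvFilterMap_enumerate pvEXPECTED_S1
    (fun e => match lk e.1 with
      | some v => if v ≠ e.2.1 ∧ PySem.Str.isIn "." e.1 = true then some [("code", e.1), ("expected", e.2.1), ("found", v)] else none
      | none => none) 0

-- ===== VERDICT (by name: the statement is the Claim_ definition above) =====
theorem check_series_spec : Claim_equal_check_series := by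
  intro s1_found s2_found _
  unfold Spec_check_series
  simp only [check_series, check_series_alt]
  have hfnd_str : (PySem.List.sorted (PySem.Dict.ofList s1_found).items (fun kv => kv.1)).Pairwise (fun a b => a.1 < b.1) :=
    pvSorted_pairwise_lt _ _ (PySem.Dict.nodup_keys_ofList s1_found)
  have hexp_str : (PySem.List.sorted pvEnumExp (fun t => t.1)).Pairwise (fun a b => a.1 < b.1) :=
    pvSorted_pairwise_lt _ _ pvEnumExp_codes_nodup
  have hmerge := pvMerge_eq _ _ hexp_str hfnd_str
  have hlk : pvLk (PySem.List.sorted (PySem.Dict.ofList s1_found).items (fun kv => kv.1)) = fun c => (PySem.Dict.ofList s1_found).get? c :=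
    funext (pvLk_sorted_items s1_found)
  rw [show (PySem.List.enumerate pvEXPECTED_S1).map (fun p => (p.2.1, p.2.2.1, p.1)) = pvEnumExp from rfl]
  simp only [pvMergeIdx_eq, List.drop_zero]
  simp only [hmerge]
  rw [pvA_miss s1_found, pvA_chg s1_found]
  rw [hlk] at *
  rw [pvB_miss, pvB_chg]
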